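-- pv_equiv track=rewrite | github.com/michael-gracie/camelup | camelup/gameplay.py | camels_in_dest_dict
-- ===== SOURCE A (Python) =====
-- def camels_in_dest_dict(camel_dict, destination):
--     max_height_dest = 0
--     camels_in_dest = []
--     for key, val in camel_dict.items():
--         if val["space"] == destination:
--             if val["height"] > max_height_dest:
--                 max_height_dest = val["height"]
--             camels_in_dest.append(key)
--     return max_height_dest, camels_in_dest
-- ===== SOURCE B (Python) =====
-- def camels_in_dest_dict(camel_dict, destination):
--     by_space = {}
--     for key, val in camel_dict.items():
--         by_space[val["space"]] = by_space.get(val["space"], []) + [(key, val)]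
--     group = by_space.get(destination, [])
--     return max([0] + [val["height"] for _, val in group]), [key for key, _ in group]
-- ===== Notes on version B (the rewrite author's own statement) =====
-- stated objective: alternative
-- what changed: Instead of scanning with a running max and a match list, B builds a grouping index (dict space -> list of (key, height) pairs in insertion order) over all camels, then answers by a single lookup of the destination group, taking its keys and the max of its heights with a 0 floor.
import Mathlib
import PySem

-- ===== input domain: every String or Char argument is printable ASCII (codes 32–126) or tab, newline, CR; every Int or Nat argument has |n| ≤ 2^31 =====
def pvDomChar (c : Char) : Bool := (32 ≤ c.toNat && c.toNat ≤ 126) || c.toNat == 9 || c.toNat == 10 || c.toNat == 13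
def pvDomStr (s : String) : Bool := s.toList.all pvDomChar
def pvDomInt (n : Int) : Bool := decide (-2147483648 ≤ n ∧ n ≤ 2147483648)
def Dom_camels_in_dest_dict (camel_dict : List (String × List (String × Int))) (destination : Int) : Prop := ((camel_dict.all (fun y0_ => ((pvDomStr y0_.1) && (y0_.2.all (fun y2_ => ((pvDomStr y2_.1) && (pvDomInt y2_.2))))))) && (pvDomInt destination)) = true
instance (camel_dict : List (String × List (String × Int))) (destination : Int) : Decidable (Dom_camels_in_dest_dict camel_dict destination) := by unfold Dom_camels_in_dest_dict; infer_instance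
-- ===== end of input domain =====

-- B replaces A's single scan with running max + match list by building a grouping index
-- (dict: space -> list of camels there) over the whole input, then answering by one lookup
-- of the destination group ("alternative": different data structure, same values).

-- ===== PORT A =====
-- A's fused loop: state (max_height_dest, camels_in_dest); val["space"]/val["height"] are dict
-- lookups (Pre_ guarantees the keys A reads are present; getD's default is unreachable under Pre_).
def camels_in_dest_dict (camel_dict : List (String × List (String × Int))) (destination : Int) : Int × List String :=
  camel_dict.foldl (fun st kv =>
    if PySem.Dict.getD (PySem.Dict.mk kv.2) "space" 0 = destination then
      ((if PySem.Dict.getD (PySem.Dict.mk kv.2) "height" 0 > st.1 then PySem.Dict.getD (PySem.Dict.mk kv.2) "height" 0 else st.1),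
       st.2 ++ [kv.1])
    else st) (0, [])

-- ===== PORT B =====
-- B's grouping loop: by_space[space] = by_space.get(space, []) + [(key, val)], then one lookup.
def camels_in_dest_dict_alt (camel_dict : List (String × List (String × Int))) (destination : Int) : Int × List String :=
  let by_space : PySem.Dict Int (List (String × List (String × Int))) :=
    camel_dict.foldl (fun d kv =>
      d.modify (PySem.Dict.getD (PySem.Dict.mk kv.2) "space" 0) [] (· ++ [kv])) PySem.Dict.empty
  let group := by_space.getD destination []
  ((group.map (fun kv => PySem.Dict.getD (PySem.Dict.mk kv.2) "height" 0)).foldl max 0,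
   group.map Prod.fst)

-- ===== PRECONDITION & SPEC =====
-- Pre_ excludes exactly the inputs where Python A raises KeyError: a value dict missing "space",
-- or one whose "space" equals destination but which is missing "height".
def Pre_camels_in_dest_dict (camel_dict : List (String × List (String × Int))) (destination : Int) : Prop :=
  ∀ kv ∈ camel_dict, (PySem.Dict.get? (PySem.Dict.mk kv.2) "space").isSome ∧
    (PySem.Dict.get? (PySem.Dict.mk kv.2) "space" = some destination → (PySem.Dict.get? (PySem.Dict.mk kv.2) "height").isSome)
instance (camel_dict : List (String × List (String × Int))) (destination : Int) : Decidable (Pre_camels_in_dest_dict camel_dict destination) := by unfold Pre_camels_in_dest_dict; infer_instance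
def pvWitness_camels_in_dest_dict : (List (String × List (String × Int))) × Int :=
  ([("red", [("space", 3), ("height", 1)]), ("blue", [("space", 2), ("height", 2)])], 3)

def Spec_camels_in_dest_dict (camel_dict : List (String × List (String × Int))) (destination : Int) (out : Int × List String) : Prop := out = camels_in_dest_dict_alt camel_dict destination
instance (camel_dict : List (String × List (String × Int))) (destination : Int) (out : Int × List String) : Decidable (Spec_camels_in_dest_dict camel_dict destination out) := by unfold Spec_camels_in_dest_dict; infer_instance

-- ===== CLAIM (what is proved, stated in full; the proofs are below) =====
def Claim_equal_camels_in_dest_dict : Prop := ∀ (camel_dict : List (String × List (String × Int))) (destination : Int), Dom_camels_in_dest_dict camel_dict destination → Pre_camels_in_dest_dict camel_dict destination → Spec_camels_in_dest_dict camel_dict destination (camels_in_dest_dict camel_dict destination)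

-- ===== LEMMAS AND PROOFS =====

-- Loop invariant for A: the fold from state (m, l) yields the max over the matching heights
-- seeded with m, and l ++ the matching keys.
theorem camels_in_dest_fold_inv (destination : Int) (xs : List (String × List (String × Int)))
    (m : Int) (l : List String) :
    xs.foldl (fun st kv =>
      if PySem.Dict.getD (PySem.Dict.mk kv.2) "space" 0 = destination then
        ((if PySem.Dict.getD (PySem.Dict.mk kv.2) "height" 0 > st.1 then PySem.Dict.getD (PySem.Dict.mk kv.2) "height" 0 else st.1),
         st.2 ++ [kv.1])
      else st) (m, l)
    = (((xs.filter (fun kv => PySem.Dict.getD (PySem.Dict.mk kv.2) "space" 0 = destination)).map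
          (fun kv => PySem.Dict.getD (PySem.Dict.mk kv.2) "height" 0)).foldl max m,
       l ++ (xs.filter (fun kv => PySem.Dict.getD (PySem.Dict.mk kv.2) "space" 0 = destination)).map Prod.fst) := by
  induction xs generalizing m l with
  | nil => simp
  | cons kv xs ih =>
    simp only [List.foldl_cons, List.filter_cons]
    by_cases h : PySem.Dict.getD (PySem.Dict.mk kv.2) "space" 0 = destination
    · have hmax : (if PySem.Dict.getD (PySem.Dict.mk kv.2) "height" 0 > m then PySem.Dict.getD (PySem.Dict.mk kv.2) "height" 0 else m)
          = max m (PySem.Dict.getD (PySem.Dict.mk kv.2) "height" 0) := by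
        rw [max_def]; split_ifs <;> omega
      simp only [h, decide_true, if_pos]
      rw [ih, hmax]
      simp
    · simp only [h, decide_false]
      exact ih m l

-- B's index lookup: the destination group of the by_space index IS the list of matching entries.
theorem group_eq (destination : Int) (xs : List (String × List (String × Int))) :
    (xs.foldl (fun d kv =>
        d.modify (PySem.Dict.getD (PySem.Dict.mk kv.2) "space" 0) [] (· ++ [kv]))
        PySem.Dict.empty).getD destination []
    = xs.filter (fun kv => PySem.Dict.getD (PySem.Dict.mk kv.2) "space" 0 = destination) := by
  have h := PySem.Dict.getD_foldl_modify_append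
    (l := xs.map (fun kv => (PySem.Dict.getD (PySem.Dict.mk kv.2) "space" 0, kv)))
    (d := (PySem.Dict.empty : PySem.Dict Int (List (String × List (String × Int)))))
    (c := destination)
  rw [List.foldl_map] at h
  rw [h]
  simp only [List.filter_map, Function.comp_def, List.map_map, PySem.Dict.getD_empty, List.nil_append, List.map_id']
  apply List.filter_congr
  intro x _
  rfl

-- ===== VERDICT (by name: the statement is the Claim_ definition above) =====
theorem camels_in_dest_dict_spec : Claim_equal_camels_in_dest_dict := by
  intro camel_dict destination _ _
  unfold Spec_camels_in_dest_dict camels_in_dest_dict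
  rw [camels_in_dest_fold_inv destination camel_dict 0 []]
  simp only [camels_in_dest_dict_alt, group_eq]
  simp
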